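-- pv_equiv track=rewrite | github.com/haolunc/ARC-RL | reference_solutions/solutions/1e0a9b12.py | transform
-- ===== SOURCE A (Python) =====
-- def transform(grid):
--     if not grid:
--         return grid
--     n = len(grid)
--     m = len(grid[0])
--     result = [[0] * m for _ in range(n)]
--     for c in range(m):
--         col_vals = [grid[r][c] for r in range(n) if grid[r][c] != 0]
--         r = n - 1
--         for v in reversed(col_vals):
--             result[r][c] = v
--             r -= 1
--     return result
-- ===== SOURCE B (Python) =====
-- def transform(grid):
--     if not grid:
--         return grid
--     n = len(grid)
--     m = len(grid[0])
--     sorted_cols = [sorted((grid[r][c] for r in range(n)), key=lambda v: v != 0)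
--                    for c in range(m)]
--     return [[sorted_cols[c][r] for c in range(m)] for r in range(n)]
-- ===== Notes on version B (the rewrite author's own statement) =====
-- stated objective: idiomatic
-- what changed: B stably sorts each column by the boolean key v != 0 (zeros first, nonzeros keep their order at the bottom) and transposes, instead of A's descending row-pointer scatter-writes into a pre-zeroed grid.
import Mathlib
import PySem

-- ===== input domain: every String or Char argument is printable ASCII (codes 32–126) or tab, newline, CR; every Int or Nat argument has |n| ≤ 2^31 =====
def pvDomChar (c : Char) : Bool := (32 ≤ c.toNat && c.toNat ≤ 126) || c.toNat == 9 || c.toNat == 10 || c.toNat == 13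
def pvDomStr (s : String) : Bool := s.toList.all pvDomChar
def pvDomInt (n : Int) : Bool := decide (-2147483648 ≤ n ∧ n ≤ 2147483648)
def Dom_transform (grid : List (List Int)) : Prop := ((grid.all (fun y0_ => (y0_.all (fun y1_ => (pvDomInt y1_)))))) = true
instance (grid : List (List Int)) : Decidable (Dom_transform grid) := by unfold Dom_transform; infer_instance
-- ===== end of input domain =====

-- B stably sorts each column by the boolean key v != 0 (zeros first, nonzeros keep their
-- order at the bottom) and transposes, instead of A's descending row-pointer scatter-writes
-- into a pre-zeroed grid; objective: an idiomatic sort-based formulation, same result.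

-- ===== PORT A =====
-- result[r][c] = v  (always in range when A executes it)
def set2 (res : List (List Int)) (r c : Nat) (v : Int) : List (List Int) :=
  res.set r ((res.getD r []).set c v)

-- the inner loop 'for v in reversed(col_vals): result[r][c] = v; r -= 1'
def dropGo (res : List (List Int)) (c : Nat) (ws : List Int) (r : Nat) : List (List Int) :=
  match ws with
  | [] => res
  | v :: vs => dropGo (set2 res r c v) c vs (r - 1)

-- [grid[r][c] for r in range(n) if grid[r][c] != 0]
def colValsA (grid : List (List Int)) (n c : Nat) : List Int :=
  ((List.range n).map (fun r => (grid.getD r []).getD c 0)).filter (fun v => v ≠ 0)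

def transform (grid : List (List Int)) : List (List Int) :=
  if grid = [] then grid else
    let n := grid.length
    let m := (grid.headD []).length
    (List.range m).foldl
      (fun res c => dropGo res c (colValsA grid n c).reverse (n - 1))
      (List.replicate n (List.replicate m 0))

-- ===== PORT B =====
-- sorted((grid[r][c] for r in range(n)), key=lambda v: v != 0): stable sort by the
-- boolean key (False < True), so zeros come first and nonzeros keep their order
def sortedCol (grid : List (List Int)) (n c : Nat) : List Int :=
  PySem.List.sorted ((List.range n).map (fun r => (grid.getD r []).getD c 0))
    (fun v => decide (v ≠ 0)) false

def transform_alt (grid : List (List Int)) : List (List Int) :=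
  if grid = [] then grid else
    let n := grid.length
    let m := (grid.headD []).length
    let sortedCols := (List.range m).map (fun c => sortedCol grid n c)
    (List.range n).map (fun r => (List.range m).map (fun c => (sortedCols.getD c []).getD r 0))

-- ===== PRECONDITION & SPEC =====
-- Pre_ excludes exactly the ragged grids (some row shorter than row 0) on which the
-- Python A raises IndexError (B raises there too).
def Pre_transform (grid : List (List Int)) : Prop :=
  ∀ row ∈ grid, (grid.headD []).length ≤ row.length
instance (grid : List (List Int)) : Decidable (Pre_transform grid) := by
  unfold Pre_transform; infer_instance
def pvWitness_transform : List (List Int) := [[1, 0], [0, 2]]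

def Spec_transform (grid : List (List Int)) (out : List (List Int)) : Prop := out = transform_alt grid
instance (grid : List (List Int)) (out : List (List Int)) : Decidable (Spec_transform grid out) := by unfold Spec_transform; infer_instance

-- ===== CLAIM (what is proved, stated in full; the proofs are below) =====
def Claim_equal_transform : Prop := ∀ (grid : List (List Int)), Dom_transform grid → Pre_transform grid → Spec_transform grid (transform grid)

-- ===== LEMMAS AND PROOFS =====

-- entry (r,c) of a matrix, 0 outside
def gget (res : List (List Int)) (r c : Nat) : Int := (res.getD r []).getD c 0

-- n×m shape, stated through getD
def Shaped (res : List (List Int)) (n m : Nat) : Prop :=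
  res.length = n ∧ ∀ i, i < n → (res.getD i []).length = m

-- the finished column as A produces it: zero padding, then the nonzero values
def colValsB (grid : List (List Int)) (c : Nat) : List Int :=
  (grid.map (fun row => row.getD c 0)).filter (fun v => v ≠ 0)

def padCol (grid : List (List Int)) (n c : Nat) : List Int :=
  let vals := colValsB grid c
  List.replicate (n - vals.length) 0 ++ vals

theorem getD_set_self {α : Type} (l : List α) (r : Nat) (x d : α) (hr : r < l.length) :
    (l.set r x).getD r d = x := by simp [List.getD, hr]

theorem getD_set_ne {α : Type} (l : List α) (r i : Nat) (x d : α) (h : i ≠ r) :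
    (l.set r x).getD i d = l.getD i d := by
  simp [List.getD, List.getElem?_set_ne (by omega : r ≠ i)]

theorem shaped_set2 {res : List (List Int)} {n m r c : Nat} {v : Int}
    (h : Shaped res n m) : Shaped (set2 res r c v) n m := by
  obtain ⟨h1, h2⟩ := h
  refine ⟨by simp [set2, h1], fun i hi => ?_⟩
  by_cases hir : i = r
  · subst hir
    by_cases hrl : i < res.length
    · rw [set2, getD_set_self _ _ _ _ hrl, List.length_set]; exact h2 i hi
    · omega
  · rw [set2, getD_set_ne _ _ _ _ _ hir]; exact h2 i hi

theorem gget_set2_same {res : List (List Int)} {n m r c : Nat} {v : Int}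
    (h : Shaped res n m) (hr : r < n) (hc : c < m) :
    gget (set2 res r c v) r c = v := by
  obtain ⟨h1, h2⟩ := h
  rw [gget, set2, getD_set_self _ _ _ _ (by omega)]
  exact getD_set_self _ _ _ _ (by rw [h2 r hr]; omega)

theorem gget_set2_other {res : List (List Int)} {r c ρ c' : Nat} {v : Int}
    (hne : ρ ≠ r ∨ c' ≠ c) : gget (set2 res r c v) ρ c' = gget res ρ c' := by
  rcases hne with hne | hne
  · rw [gget, set2, getD_set_ne _ _ _ _ _ hne]; rfl
  · rw [gget, set2]
    by_cases hir : ρ = r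
    · subst hir
      by_cases hrl : ρ < res.length
      · rw [getD_set_self _ _ _ _ hrl, gget, getD_set_ne _ _ _ _ _ hne]
      · rw [List.set_eq_of_length_le (by omega : res.length ≤ ρ)]; rfl
    · rw [getD_set_ne _ _ _ _ _ hir]; rfl

theorem shaped_dropGo {n m c : Nat} (ws : List Int) :
    ∀ (res : List (List Int)) (r : Nat), Shaped res n m → Shaped (dropGo res c ws r) n m := by
  induction ws with
  | nil => intro res r h; exact h
  | cons v vs ih => intro res r h; exact ih _ _ (shaped_set2 h)

theorem gget_dropGo {n m c : Nat} (ws : List Int) :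
    ∀ (res : List (List Int)) (r : Nat), Shaped res n m → c < m → r < n → ws.length ≤ r + 1 →
    ∀ ρ, ρ < n → ∀ c', c' < m →
    gget (dropGo res c ws r) ρ c' =
      if c' = c ∧ r + 1 - ws.length ≤ ρ ∧ ρ ≤ r then ws.getD (r - ρ) 0
      else gget res ρ c' := by
  induction ws with
  | nil =>
    intro res r h hc hr hlen ρ hρ c' hc'
    simp [dropGo]
  | cons v vs ih =>
    intro res r h hc hr hlen ρ hρ c' hc'
    simp only [dropGo]
    rcases Nat.eq_zero_or_pos r with hr0 | hrpos
    · subst hr0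
      have hvs : vs = [] := by
        cases vs with
        | nil => rfl
        | cons a l => simp at hlen
      subst hvs
      simp only [dropGo]
      by_cases he : ρ = 0 ∧ c' = c
      · obtain ⟨he1, he2⟩ := he; subst he1; subst he2
        rw [gget_set2_same h hr hc, if_pos (by simp)]
        rfl
      · rw [gget_set2_other (by tauto),
          if_neg (fun hcon => he ⟨by omega, hcon.1⟩)]
    · have hlen' : vs.length ≤ (r - 1) + 1 := by
        simp only [List.length_cons] at hlen; omega
      rw [ih (set2 res r c v) (r - 1) (shaped_set2 h) hc (by omega) hlen' ρ hρ c' hc']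
      simp only [List.length_cons]
      by_cases hcc : c' = c
      · subst hcc
        by_cases hρr : ρ = r
        · subst hρr
          rw [if_neg (by omega), gget_set2_same h hr hc, if_pos (by omega)]
          have : ρ - ρ = 0 := by omega
          rw [this]; rfl
        · by_cases hin : r - 1 + 1 - vs.length ≤ ρ ∧ ρ ≤ r - 1
          · rw [if_pos ⟨rfl, hin⟩, if_pos ⟨rfl, by omega, by omega⟩]
            have : r - ρ = (r - 1 - ρ) + 1 := by omega
            rw [this]
            rfl
          · rw [if_neg (fun hcon => hin hcon.2), gget_set2_other (Or.inl hρr),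
              if_neg (fun hcon => hin ⟨by omega, by omega⟩)]
      · rw [if_neg (fun hcon => hcc hcon.1), if_neg (fun hcon => hcc hcon.1),
          gget_set2_other (Or.inr hcc)]

theorem colValsA_eq (grid : List (List Int)) (c : Nat) :
    colValsA grid grid.length c = colValsB grid c := by
  unfold colValsA colValsB
  congr 1
  apply List.ext_getElem (by simp)
  intro i h1 h2
  simp [List.getD_eq_getElem?_getD, List.getElem?_eq_getElem (by simpa using h2)]

theorem colValsB_len_le (grid : List (List Int)) (c : Nat) :
    (colValsB grid c).length ≤ grid.length := by
  unfold colValsB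
  calc _ ≤ (grid.map (fun row => row.getD c 0)).length := List.length_filter_le _ _
  _ = grid.length := by simp

theorem getD_reverse (l : List Int) (i : Nat) (h : i < l.length) :
    l.reverse.getD i 0 = l.getD (l.length - 1 - i) 0 := by
  rw [List.getD_eq_getElem _ _ (by simpa using h), List.getD_eq_getElem _ _ (by omega),
    List.getElem_reverse]

theorem padCol_getD {grid : List (List Int)} {n c ρ : Nat}
    (hlen : (colValsB grid c).length ≤ n) :
    (padCol grid n c).getD ρ 0 =
      if n - (colValsB grid c).length ≤ ρ
      then (colValsB grid c).getD (ρ - (n - (colValsB grid c).length)) 0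
      else 0 := by
  unfold padCol
  dsimp only
  split
  · rw [List.getD_append_right _ _ _ _ (by simp; omega)]
    simp
  · rw [List.getD_append _ _ _ _ (by simp; omega), List.getD_replicate _ (by omega)]

theorem gget_colStep {grid res : List (List Int)} {n m c : Nat}
    (hn : n = grid.length) (hpos : 0 < n)
    (h : Shaped res n m) (hc : c < m)
    (hz : ∀ ρ, ρ < n → gget res ρ c = 0) :
    ∀ ρ, ρ < n → ∀ c', c' < m →
    gget (dropGo res c (colValsB grid c).reverse (n - 1)) ρ c' =
      if c' = c then (padCol grid n c).getD ρ 0 else gget res ρ c' := by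
  intro ρ hρ c' hc'
  have hlen : (colValsB grid c).length ≤ n := hn ▸ colValsB_len_le grid c
  rw [gget_dropGo _ _ _ h hc (by omega) (by simp; omega) ρ hρ c' hc']
  by_cases hcc : c' = c
  · subst hcc
    rw [if_pos rfl, padCol_getD hlen]
    simp only [List.length_reverse]
    by_cases hin : n - (colValsB grid c').length ≤ ρ
    · have hlpos : 0 < (colValsB grid c').length := by omega
      have hcond : True ∧ n - 1 + 1 - (colValsB grid c').length ≤ ρ ∧ ρ ≤ n - 1 :=
        ⟨trivial, by omega, by omega⟩
      rw [if_pos hcond, if_pos hin, getD_reverse _ _ (by omega)]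
      congr 1
      omega
    · rw [if_neg (fun hcon => hin (by omega)), if_neg hin]
      exact hz ρ hρ
  · rw [if_neg (fun hcon => hcc hcon.1), if_neg hcc]

theorem gget_fold {grid : List (List Int)} {n m : Nat}
    (hn : n = grid.length) (hpos : 0 < n) :
    ∀ (L : List Nat) (res : List (List Int)), L.Nodup → (∀ c ∈ L, c < m) →
    Shaped res n m → (∀ c ∈ L, ∀ ρ, ρ < n → gget res ρ c = 0) →
    Shaped (L.foldl (fun res c => dropGo res c (colValsA grid n c).reverse (n - 1)) res) n m ∧
    (∀ ρ, ρ < n → ∀ c', c' < m →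
      gget (L.foldl (fun res c => dropGo res c (colValsA grid n c).reverse (n - 1)) res) ρ c' =
        if c' ∈ L then (padCol grid n c').getD ρ 0 else gget res ρ c') := by
  intro L
  induction L with
  | nil =>
    intro res _ _ hsh _
    refine ⟨hsh, fun ρ hρ c' hc' => by simp⟩
  | cons c cs ih =>
    intro res hnd hmem hsh hz
    simp only [List.foldl_cons]
    have hcA : colValsA grid n c = colValsB grid c := by rw [hn]; exact colValsA_eq grid c
    have hstep : ∀ ρ, ρ < n → ∀ c', c' < m →
        gget (dropGo res c (colValsA grid n c).reverse (n - 1)) ρ c' =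
          if c' = c then (padCol grid n c).getD ρ 0 else gget res ρ c' := by
      rw [hcA]
      exact gget_colStep hn hpos hsh (hmem c (by simp)) (hz c (by simp))
    have hsh' : Shaped (dropGo res c (colValsA grid n c).reverse (n - 1)) n m :=
      shaped_dropGo _ res _ hsh
    have hnd' : cs.Nodup := (List.nodup_cons.mp hnd).2
    have hcnot : c ∉ cs := (List.nodup_cons.mp hnd).1
    obtain ⟨ih1, ih2⟩ := ih (dropGo res c (colValsA grid n c).reverse (n - 1)) hnd'
      (fun c' hc' => hmem c' (by simp [hc']))
      hsh'
      (fun c' hc' ρ hρ => by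
        rw [hstep ρ hρ c' (hmem c' (by simp [hc']))]
        rw [if_neg (by intro he; exact hcnot (he ▸ hc'))]
        exact hz c' (by simp [hc']) ρ hρ)
    refine ⟨ih1, fun ρ hρ c' hc' => ?_⟩
    rw [ih2 ρ hρ c' hc']
    by_cases hin : c' ∈ cs
    · rw [if_pos hin, if_pos (by simp [hin])]
    · rw [if_neg hin, hstep ρ hρ c' hc']
      by_cases hce : c' = c
      · subst hce; rw [if_pos rfl, if_pos (by simp)]
      · rw [if_neg hce, if_neg (by simp [hce, hin])]

-- ===== the B side: the stable bool-key sort partitions the column =====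

-- inserting a zero (key false) into 'zeros ++ nonzeros' puts it right after the zeros
theorem insertBy_cons (before : Int → Int → Bool) (x y : Int) (ys : List Int) :
    PySem.List.insertBy before x (y :: ys)
      = if before x y then x :: y :: ys else y :: PySem.List.insertBy before x ys := by
  simp [PySem.List.insertBy]

theorem insertBy_zero (zs ns : List Int) (hz : ∀ z ∈ zs, z = 0) (hn : ∀ y ∈ ns, y ≠ 0) :
    PySem.List.insertBy
      (fun a b => decide ((fun v => decide (v ≠ 0)) a < (fun v => decide (v ≠ 0)) b)) 0 (zs ++ ns)
      = zs ++ 0 :: ns := by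
  induction zs with
  | nil =>
    cases ns with
    | nil => rfl
    | cons y ys =>
      have hy : y ≠ 0 := hn y (by simp)
      rw [List.nil_append, insertBy_cons]
      split
      · rfl
      · next h => exfalso; simp [hy] at h
  | cons z zt ih =>
    have hz0 : z = 0 := hz z (by simp)
    subst hz0
    rw [List.cons_append, insertBy_cons]
    split
    · next h => exfalso; simp at h
    · rw [ih (fun z hzm => hz z (by simp [hzm]))]
      rfl

-- inserting a nonzero (key true) appends it at the end
theorem insertBy_nonzero (x : Int) (hx : x ≠ 0) (l : List Int) :
    PySem.List.insertBy
      (fun a b => decide ((fun v => decide (v ≠ 0)) a < (fun v => decide (v ≠ 0)) b)) x l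
      = l ++ [x] := by
  apply PySem.List.insertBy_of_forall_not_before
  intro y _
  simp [hx]

-- the insertion-sort fold keeps the accumulator partitioned as zeros ++ nonzeros
theorem foldl_insertBy_partition (xs : List Int) :
    ∀ (zs ns : List Int), (∀ z ∈ zs, z = 0) → (∀ y ∈ ns, y ≠ 0) →
    xs.foldl (fun acc x => PySem.List.insertBy
        (fun a b => decide ((fun v => decide (v ≠ 0)) a < (fun v => decide (v ≠ 0)) b)) x acc)
      (zs ++ ns)
      = (zs ++ xs.filter (fun v => decide (v = 0))) ++ (ns ++ xs.filter (fun v => decide (v ≠ 0))) := by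
  induction xs with
  | nil => intro zs ns _ _; simp
  | cons x xt ih =>
    intro zs ns hz hn
    simp only [List.foldl_cons]
    by_cases hx : x = 0
    · subst hx
      rw [insertBy_zero zs ns hz hn]
      have h2 : zs ++ 0 :: ns = (zs ++ [(0:Int)]) ++ ns := by simp
      rw [h2, ih (zs ++ [0]) ns (by intro z hzm; rcases List.mem_append.mp hzm with h | h
                                    · exact hz z h
                                    · simpa using h) hn]
      simp [List.filter]
    · rw [insertBy_nonzero x hx (zs ++ ns)]
      have h2 : (zs ++ ns) ++ [x] = zs ++ (ns ++ [x]) := by simp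
      rw [h2, ih zs (ns ++ [x]) hz (by intro y hym; rcases List.mem_append.mp hym with h | h
                                       · exact hn y h
                                       · simp at h; subst h; exact hx)]
      simp [List.filter, hx]

-- sorted(col, key=lambda v: v != 0) = zeros of col ++ nonzeros of col (stable partition)
theorem sorted_bool_key_partition (xs : List Int) :
    PySem.List.sorted xs (fun v => decide (v ≠ 0)) false
      = xs.filter (fun v => decide (v = 0)) ++ xs.filter (fun v => decide (v ≠ 0)) := by
  rw [PySem.List.sorted_eq_foldl_insertBy]
  simpa using foldl_insertBy_partition xs [] [] (by simp) (by simp)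

theorem length_filter_split (xs : List Int) :
    (xs.filter (fun v => decide (v = 0))).length + (xs.filter (fun v => decide (v ≠ 0))).length
      = xs.length := by
  have h := List.length_eq_length_filter_add (l := xs) (fun v => decide (v = 0))
  have h2 : xs.filter (fun v => !decide (v = 0)) = xs.filter (fun v => decide (v ≠ 0)) := by
    apply List.filter_congr
    intro v _
    simp
  rw [h2] at h
  omega

-- B's sorted column is exactly A's finished column
theorem sortedCol_eq_padCol (grid : List (List Int)) (c : Nat) :
    sortedCol grid grid.length c = padCol grid grid.length c := by
  unfold sortedCol padCol
  have hcol : (List.range grid.length).map (fun r => (grid.getD r []).getD c 0)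
      = grid.map (fun row => row.getD c 0) := by
    apply List.ext_getElem (by simp)
    intro i h1 h2
    simp [List.getD_eq_getElem?_getD, List.getElem?_eq_getElem (by simpa using h2)]
  rw [sorted_bool_key_partition, hcol]
  set col := grid.map (fun row => row.getD c 0) with hcoldef
  have hvals : colValsB grid c = col.filter (fun v => decide (v ≠ 0)) := by
    unfold colValsB; rfl
  rw [← hvals]
  congr 1
  have hlen : (col.filter (fun v => decide (v = 0))).length
      = grid.length - (colValsB grid c).length := by
    have h1 := length_filter_split col
    rw [← hvals] at h1
    have hc : col.length = grid.length := by simp [hcoldef]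
    omega
  rw [← hlen]
  exact List.eq_replicate_of_mem (fun b hb => by simpa using List.of_mem_filter hb)

theorem transform_eq (grid : List (List Int)) : transform grid = transform_alt grid := by
  by_cases hg : grid = []
  · simp [transform, transform_alt, hg]
  · have hpos : 0 < grid.length := List.length_pos_iff.mpr hg
    unfold transform transform_alt
    rw [if_neg hg, if_neg hg]
    dsimp only
    set n := grid.length with hn
    set m := (grid.headD []).length with hm
    have hzero : Shaped (List.replicate n (List.replicate m (0:Int))) n m := by
      refine ⟨by simp, fun i hi => ?_⟩
      rw [List.getD_replicate _ (by omega)]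
      simp
    have hz : ∀ c ∈ List.range m, ∀ ρ, ρ < n → gget (List.replicate n (List.replicate m (0:Int))) ρ c = 0 := by
      intro c hc ρ hρ
      rw [gget, List.getD_replicate _ (by omega), List.getD_replicate _ (List.mem_range.mp hc)]
    obtain ⟨⟨hl, hrow⟩, hpt⟩ := gget_fold hn hpos (List.range m)
      (List.replicate n (List.replicate m (0:Int))) List.nodup_range
      (fun c hc => List.mem_range.mp hc) hzero hz
    apply List.ext_getElem (by simp [hl])
    intro r h1 h2
    have hr : r < n := by rwa [hl] at h1
    apply List.ext_getElem
    · simp only [List.getElem_map, List.getElem_range, List.length_map, List.length_range]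
      rw [← List.getD_eq_getElem _ [] h1]
      exact hrow r hr
    · intro c hc1 hc2
      have hcm : c < m := by simpa using hc2
      have hkey := hpt r hr c hcm
      rw [gget, List.getD_eq_getElem _ [] h1,
        List.getD_eq_getElem _ 0 (by rw [← List.getD_eq_getElem _ [] h1, hrow r hr]; exact hcm),
        if_pos (List.mem_range.mpr hcm)] at hkey
      simp only [List.getElem_map, List.getElem_range]
      rw [hkey, List.getD_eq_getElem _ [] (by simpa using hcm), List.getElem_map,
        List.getElem_range, sortedCol_eq_padCol]


-- ===== VERDICT (by name: the statement is the Claim_ definition above) =====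
theorem transform_spec : Claim_equal_transform := by
  intro grid _ _
  unfold Spec_transform
  exact transform_eq grid
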